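-- pv_equiv track=rewrite | github.com/23adrian2300/WDI-AGH | Zestaw 3/Zestaw 3.py | skoczek
-- ===== SOURCE A (Python) =====
-- def skoczek(T):
--     n = len(T)
--     moves = [False] * n
--     moves[0] = True
--     for i in range(n):
--         if moves[i]:
--             d = 2
--             while T[i] > 1:
--                 if T[i] % d == 0:
--                     if i + d < n:
--                         moves[i + d] = True
--                     while T[i] % d == 0:
--                         T[i] //= d
--                 d += 1
--     return moves
-- ===== SOURCE B (Python) =====
-- def _prime_factors(v):
--     # distinct prime factors of v in increasing order; [] for v <= 1
--     ps = []
--     d = 2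
--     while d * d <= v:
--         if v % d == 0:
--             ps.append(d)
--             while v % d == 0:
--                 v //= d
--         d += 1
--     if v > 1:
--         ps.append(v)
--     return ps
--
-- def skoczek(T):
--     n = len(T)
--     moves = [False] * n
--     moves[0] = True
--     for i, v in enumerate(T):
--         if moves[i]:
--             for p in _prime_factors(v):
--                 if i + p < n:
--                     moves[i + p] = True
--     return moves
-- ===== Notes on version B (the rewrite author's own statement) =====
-- stated objective: faster
-- what changed: A interleaves marking with trial division that counts d up to the value itself (O(v) per element) and mutates T in place; B extracts a pure distinct-prime-factor helper that trial-divides only up to sqrt(v) with the leftover prime handled separately, then marks moves in a clean enumerate pass without mutating T.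
import Mathlib
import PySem

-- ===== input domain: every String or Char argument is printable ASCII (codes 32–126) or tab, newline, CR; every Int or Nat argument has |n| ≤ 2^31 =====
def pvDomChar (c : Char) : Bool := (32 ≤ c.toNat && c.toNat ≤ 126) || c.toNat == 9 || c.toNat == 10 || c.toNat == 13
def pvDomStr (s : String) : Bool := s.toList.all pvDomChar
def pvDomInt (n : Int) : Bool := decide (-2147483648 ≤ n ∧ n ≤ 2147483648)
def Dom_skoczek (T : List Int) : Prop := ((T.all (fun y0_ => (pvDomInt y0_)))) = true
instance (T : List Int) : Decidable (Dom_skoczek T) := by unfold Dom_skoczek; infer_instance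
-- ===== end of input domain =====

-- B replaces A's per-index trial division up to the value itself (interleaved with marking) by a pure
-- distinct-prime-factor helper that trial-divides only up to sqrt(v), then a clean marking pass.  A mutates
-- T in place (reachable entries driven to 1) while B does not, so the equivalence proved is about the
-- RETURN value only.  The while-loops are ported as structural recursion on a fuel equal to a proven
-- termination measure (fuel is a totality device only: the lemmas below show it never runs out).

-- ===== PORT A =====

-- Inner loop 'while v % d == 0: v //= d' (this loop occurs verbatim in both Pythons, so both ports share
-- it).  The guard conjuncts '2 ≤ d ∧ 0 < v' beyond Python's test 'v % d == 0' are totality-only: they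
-- hold at every call site reachable from the ports below.
def pyDivOutF : Nat → Int → Int → Int
  | 0, v, _ => v
  | fuel + 1, v, d =>
    if 2 ≤ d ∧ 0 < v ∧ PySem.Int.mod v d = 0 then pyDivOutF fuel (PySem.Int.floordiv v d) d else v

def pyDivOut (v d : Int) : Int := pyDivOutF v.toNat v d

-- A's 'while T[i] > 1: ...' loop at index i (value v = T[i], trial divisor d, moves threaded through).
-- The guard conjuncts '2 ≤ d ∧ d ≤ v' beyond Python's test 'v > 1' are totality-only: they hold at every
-- reachable state (d starts at 2, and all divisors < d have been divided out), and at a state violating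
-- them with v > 1 the Python loop would never terminate.
def skWhileF : Nat → Int → Int → Int → Int → List Bool → List Bool
  | 0, _, _, _, _, moves => moves
  | fuel + 1, i, n, v, d, moves =>
    if 1 < v ∧ 2 ≤ d ∧ d ≤ v then
      if PySem.Int.mod v d = 0 then
        skWhileF fuel i n (pyDivOut v d) (d + 1)
          (if i + d < n then PySem.List.pySetD moves (i + d) true else moves)
      else skWhileF fuel i n v (d + 1) moves
    else moves

def skWhile (i n v d : Int) (moves : List Bool) : List Bool :=
  skWhileF (3 * v.toNat + (v - d).toNat) i n v d moves

def skoczek (T : List Int) : List Bool :=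
  let n : Int := T.length
  let moves := PySem.List.pySetD (List.replicate T.length false) 0 true
  (PySem.List.pyRange 0 n 1).foldl
    (fun moves i =>
      if PySem.List.pyGetD moves i false = true then
        skWhile i n (PySem.List.pyGetD T i 0) 2 moves
      else moves)
    moves

-- ===== PORT B =====

-- B's _prime_factors: trial division 'while d * d <= v', dividing out each found prime, leftover prime
-- appended at the end.  The guard conjunct '2 ≤ d' is totality-only (d starts at 2).
def altFactorsF : Nat → Int → Int → List Int
  | 0, v, _ => if 1 < v then [v] else []
  | fuel + 1, v, d =>
    if 2 ≤ d ∧ d * d ≤ v then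
      if PySem.Int.mod v d = 0 then d :: altFactorsF fuel (pyDivOut v d) (d + 1)
      else altFactorsF fuel v (d + 1)
    else if 1 < v then [v] else []

def altFactors (v d : Int) : List Int := altFactorsF (v + 1 - d).toNat v d

def skoczek_alt (T : List Int) : List Bool :=
  let n : Int := T.length
  let moves := PySem.List.pySetD (List.replicate T.length false) 0 true
  (PySem.List.enumerate T).foldl
    (fun moves iv =>
      if PySem.List.pyGetD moves iv.1 false = true then
        (altFactors iv.2 2).foldl
          (fun moves p => if iv.1 + p < n then PySem.List.pySetD moves (iv.1 + p) true else moves)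
          moves
      else moves)
    moves

-- ===== PRECONDITION & SPEC =====
-- Pre_ excludes only the empty list, on which the Python A raises IndexError at 'moves[0] = True'
-- (and B raises the same way).
def Pre_skoczek (T : List Int) : Prop := T ≠ []
instance (T : List Int) : Decidable (Pre_skoczek T) := by unfold Pre_skoczek; infer_instance

def pvWitness_skoczek : List Int := ([6, 2, 15])

def Spec_skoczek (T : List Int) (out : List Bool) : Prop := out = skoczek_alt T
instance (T : List Int) (out : List Bool) : Decidable (Spec_skoczek T out) := by unfold Spec_skoczek; infer_instance

-- ===== CLAIM (what is proved, stated in full; the proofs are below) =====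
def Claim_equal_skoczek : Prop := ∀ (T : List Int), Dom_skoczek T → Pre_skoczek T → Spec_skoczek T (skoczek T)

-- ===== LEMMAS AND PROOFS =====

-- Any fuel at least v.toNat gives pyDivOutF the same value.
theorem pyDivOutF_stable : ∀ (f1 f2 : Nat) (v d : Int), v.toNat ≤ f1 → v.toNat ≤ f2 →
    pyDivOutF f1 v d = pyDivOutF f2 v d := by
  intro f1
  induction f1 with
  | zero =>
    intro f2 v d h1 h2
    cases f2 with
    | zero => rfl
    | succ f2 =>
      simp only [pyDivOutF]
      rw [if_neg]
      rintro ⟨-, hv, -⟩; omega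
  | succ f1 ih =>
    intro f2 v d h1 h2
    cases f2 with
    | zero =>
      simp only [pyDivOutF]
      rw [if_neg]
      rintro ⟨-, hv, -⟩; omega
    | succ f2 =>
      simp only [pyDivOutF]
      by_cases h : 2 ≤ d ∧ 0 < v ∧ PySem.Int.mod v d = 0
      · rw [if_pos h, if_pos h]
        obtain ⟨hd, hv, hm⟩ := h
        have hdvd : d ∣ v := (PySem.Int.mod_eq_zero_iff_dvd v d).mp hm
        have hfd : PySem.Int.floordiv v d = v / d := PySem.Int.floordiv_eq_ediv_of_pos (by omega)
        have h1' : 0 ≤ v / d := Int.ediv_nonneg (by omega) (by omega)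
        have hmul : v / d * d = v := Int.ediv_mul_cancel hdvd
        have h2' : v / d < v := by nlinarith
        rw [hfd]
        exact ih f2 (v / d) d (by omega) (by omega)
      · rw [if_neg h, if_neg h]

-- The one-step unfolding equation of pyDivOut (Python's inner while-loop step).
theorem pyDivOut_eq (v d : Int) : pyDivOut v d =
    if 2 ≤ d ∧ 0 < v ∧ PySem.Int.mod v d = 0 then pyDivOut (PySem.Int.floordiv v d) d else v := by
  unfold pyDivOut
  by_cases h : 2 ≤ d ∧ 0 < v ∧ PySem.Int.mod v d = 0
  · rw [if_pos h]
    obtain ⟨hd, hv, hm⟩ := h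
    obtain ⟨k, hk⟩ : ∃ k, v.toNat = k + 1 := ⟨v.toNat - 1, by omega⟩
    rw [hk]
    have hg : 2 ≤ d ∧ 0 < v ∧ PySem.Int.mod v d = 0 := ⟨hd, hv, hm⟩
    simp only [pyDivOutF]
    rw [if_pos hg]
    have hdvd : d ∣ v := (PySem.Int.mod_eq_zero_iff_dvd v d).mp hm
    have hfd : PySem.Int.floordiv v d = v / d := PySem.Int.floordiv_eq_ediv_of_pos (by omega)
    have h1' : 0 ≤ v / d := Int.ediv_nonneg (by omega) (by omega)
    have hmul : v / d * d = v := Int.ediv_mul_cancel hdvd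
    have h2' : v / d < v := by nlinarith
    rw [hfd]
    exact pyDivOutF_stable k (v / d).toNat (v / d) d (by omega) le_rfl
  · rw [if_neg h]
    cases hvt : v.toNat with
    | zero => rfl
    | succ k =>
      simp only [pyDivOutF]
      rw [if_neg h]

theorem pyDivOut_spec : ∀ (N : Nat) (v d : Int), v.toNat ≤ N → 2 ≤ d → 0 < v →
    0 < pyDivOut v d ∧ pyDivOut v d ≤ v ∧ pyDivOut v d ∣ v ∧ ¬ d ∣ pyDivOut v d := by
  intro N
  induction N with
  | zero => intro v d hN hd hv; omega
  | succ N ih =>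
    intro v d hN hd hv
    rw [pyDivOut_eq]
    by_cases h : 2 ≤ d ∧ 0 < v ∧ PySem.Int.mod v d = 0
    · rw [if_pos h]
      have hdvd : d ∣ v := (PySem.Int.mod_eq_zero_iff_dvd v d).mp h.2.2
      have hdle : d ≤ v := Int.le_of_dvd hv hdvd
      have hfd : PySem.Int.floordiv v d = v / d := PySem.Int.floordiv_eq_ediv_of_pos (by omega)
      have hmul : v / d * d = v := Int.ediv_mul_cancel hdvd
      have h1 : 1 ≤ v / d := by nlinarith [Int.ediv_nonneg (le_of_lt hv) (by omega : (0:Int) ≤ d)]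
      have h2 : v / d < v := by nlinarith
      rw [hfd]
      obtain ⟨p1, p2, p3, p4⟩ := ih (v / d) d (by omega) hd (by omega)
      exact ⟨p1, by omega, p3.trans ⟨d, hmul.symm⟩, p4⟩
    · rw [if_neg h]
      refine ⟨hv, le_refl v, dvd_refl v, fun hdvd => ?_⟩
      exact h ⟨hd, hv, (PySem.Int.mod_eq_zero_iff_dvd v d).mpr hdvd⟩

-- The measure 3·v + (v - d) strictly drops across a dividing step of A's loop.
theorem muDec_div (v d : Int) (hv : 1 < v) (hd : 2 ≤ d) (hm : PySem.Int.mod v d = 0) :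
    3 * (pyDivOut v d).toNat + (pyDivOut v d - (d + 1)).toNat < 3 * v.toNat + (v - d).toNat := by
  have hdvd : d ∣ v := (PySem.Int.mod_eq_zero_iff_dvd v d).mp hm
  obtain ⟨p1, p2, p3, p4⟩ := pyDivOut_spec v.toNat v d le_rfl hd (by omega)
  obtain ⟨k, hk⟩ := p3
  have hk1 : 1 ≤ k := by nlinarith
  have hk2 : 2 ≤ k := by
    rcases eq_or_lt_of_le hk1 with he | he
    · exfalso; apply p4; rw [← he, mul_one] at hk; rw [hk.symm]; exact hdvd
    · omega
  have h2v : 2 * pyDivOut v d ≤ v := by nlinarith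
  omega

-- Any fuel at least the measure gives skWhileF the same value.
theorem skWhileF_stable : ∀ (f1 f2 : Nat) (i n v d : Int) (moves : List Bool),
    3 * v.toNat + (v - d).toNat ≤ f1 → 3 * v.toNat + (v - d).toNat ≤ f2 →
    skWhileF f1 i n v d moves = skWhileF f2 i n v d moves := by
  intro f1
  induction f1 with
  | zero =>
    intro f2 i n v d moves h1 h2
    cases f2 with
    | zero => rfl
    | succ f2 =>
      simp only [skWhileF]
      rw [if_neg]
      rintro ⟨hv, -, -⟩; omega
  | succ f1 ih =>
    intro f2 i n v d moves h1 h2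
    cases f2 with
    | zero =>
      simp only [skWhileF]
      rw [if_neg]
      rintro ⟨hv, -, -⟩; omega
    | succ f2 =>
      simp only [skWhileF]
      by_cases h : 1 < v ∧ 2 ≤ d ∧ d ≤ v
      · rw [if_pos h, if_pos h]
        obtain ⟨hv, hd, hdv⟩ := h
        by_cases hm : PySem.Int.mod v d = 0
        · rw [if_pos hm, if_pos hm]
          have := muDec_div v d hv hd hm
          exact ih f2 i n (pyDivOut v d) (d + 1) _ (by omega) (by omega)
        · rw [if_neg hm, if_neg hm]
          have hne : d ≠ v := by
            rintro rfl; exact hm ((PySem.Int.mod_eq_zero_iff_dvd d d).mpr dvd_rfl)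
          exact ih f2 i n v (d + 1) moves (by omega) (by omega)
      · rw [if_neg h, if_neg h]

-- The one-step unfolding equation of skWhile (Python's 'while T[i] > 1' loop step).
theorem skWhile_eq (i n v d : Int) (moves : List Bool) : skWhile i n v d moves =
    if 1 < v ∧ 2 ≤ d ∧ d ≤ v then
      if PySem.Int.mod v d = 0 then
        skWhile i n (pyDivOut v d) (d + 1)
          (if i + d < n then PySem.List.pySetD moves (i + d) true else moves)
      else skWhile i n v (d + 1) moves
    else moves := by
  unfold skWhile
  by_cases h : 1 < v ∧ 2 ≤ d ∧ d ≤ v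
  · rw [if_pos h]
    obtain ⟨hv, hd, hdv⟩ := h
    obtain ⟨k, hk⟩ : ∃ k, 3 * v.toNat + (v - d).toNat = k + 1 := ⟨3 * v.toNat + (v - d).toNat - 1, by omega⟩
    rw [hk]
    have hg : 1 < v ∧ 2 ≤ d ∧ d ≤ v := ⟨hv, hd, hdv⟩
    simp only [skWhileF]
    rw [if_pos hg]
    by_cases hm : PySem.Int.mod v d = 0
    · rw [if_pos hm, if_pos hm]
      have := muDec_div v d hv hd hm
      exact skWhileF_stable k _ i n (pyDivOut v d) (d + 1) _ (by omega) le_rfl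
    · rw [if_neg hm, if_neg hm]
      have hne : d ≠ v := by
        rintro rfl; exact hm ((PySem.Int.mod_eq_zero_iff_dvd d d).mpr dvd_rfl)
      exact skWhileF_stable k _ i n v (d + 1) moves (by omega) le_rfl
  · rw [if_neg h]
    cases hvt : 3 * v.toNat + (v - d).toNat with
    | zero => rfl
    | succ k =>
      simp only [skWhileF]
      rw [if_neg h]

-- The measure (v + 1 - d) strictly drops across each step of B's factor loop.
theorem nuDec_div (v d : Int) (hd : 2 ≤ d) (hsq : d * d ≤ v) (hm : PySem.Int.mod v d = 0) :
    (pyDivOut v d + 1 - (d + 1)).toNat < (v + 1 - d).toNat := by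
  have h2d : 2 * d ≤ d * d := by nlinarith
  obtain ⟨p1, p2, p3, p4⟩ := pyDivOut_spec v.toNat v d le_rfl hd (by nlinarith)
  omega

-- Any fuel at least the measure gives altFactorsF the same value.
theorem altFactorsF_stable : ∀ (f1 f2 : Nat) (v d : Int),
    (v + 1 - d).toNat ≤ f1 → (v + 1 - d).toNat ≤ f2 →
    altFactorsF f1 v d = altFactorsF f2 v d := by
  intro f1
  induction f1 with
  | zero =>
    intro f2 v d h1 h2
    cases f2 with
    | zero => rfl
    | succ f2 =>
      have hng : ¬(2 ≤ d ∧ d * d ≤ v) := by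
        rintro ⟨hd, hsq⟩
        have h2d : 2 * d ≤ d * d := by nlinarith
        omega
      simp only [altFactorsF]
      rw [if_neg hng]
  | succ f1 ih =>
    intro f2 v d h1 h2
    cases f2 with
    | zero =>
      have hng : ¬(2 ≤ d ∧ d * d ≤ v) := by
        rintro ⟨hd, hsq⟩
        have h2d : 2 * d ≤ d * d := by nlinarith
        omega
      simp only [altFactorsF]
      rw [if_neg hng]
    | succ f2 =>
      simp only [altFactorsF]
      by_cases h : 2 ≤ d ∧ d * d ≤ v
      · rw [if_pos h, if_pos h]
        obtain ⟨hd, hsq⟩ := h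
        have h2d : 2 * d ≤ d * d := by nlinarith
        by_cases hm : PySem.Int.mod v d = 0
        · rw [if_pos hm, if_pos hm]
          have := nuDec_div v d hd hsq hm
          rw [ih f2 (pyDivOut v d) (d + 1) (by omega) (by omega)]
        · rw [if_neg hm, if_neg hm]
          exact ih f2 v (d + 1) (by omega) (by omega)
      · rw [if_neg h, if_neg h]

-- The one-step unfolding equation of altFactors (B's 'while d * d <= v' loop step).
theorem altFactors_eq (v d : Int) : altFactors v d =
    if 2 ≤ d ∧ d * d ≤ v then
      if PySem.Int.mod v d = 0 then d :: altFactors (pyDivOut v d) (d + 1)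
      else altFactors v (d + 1)
    else if 1 < v then [v] else [] := by
  unfold altFactors
  by_cases h : 2 ≤ d ∧ d * d ≤ v
  · rw [if_pos h]
    obtain ⟨hd, hsq⟩ := h
    have h2d : 2 * d ≤ d * d := by nlinarith
    obtain ⟨k, hk⟩ : ∃ k, (v + 1 - d).toNat = k + 1 := ⟨(v + 1 - d).toNat - 1, by omega⟩
    rw [hk]
    have hg : 2 ≤ d ∧ d * d ≤ v := ⟨hd, hsq⟩
    simp only [altFactorsF]
    rw [if_pos hg]
    by_cases hm : PySem.Int.mod v d = 0
    · rw [if_pos hm, if_pos hm]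
      have := nuDec_div v d hd hsq hm
      rw [altFactorsF_stable k _ (pyDivOut v d) (d + 1) (by omega) le_rfl]
    · rw [if_neg hm, if_neg hm]
      exact altFactorsF_stable k _ v (d + 1) (by omega) le_rfl
  · rw [if_neg h]
    cases hvt : (v + 1 - d).toNat with
    | zero => rfl
    | succ k =>
      simp only [altFactorsF]
      rw [if_neg h]

-- When v = d, A's loop finds the divisor d = v at once, marks i + v, divides v down to 1 and stops.
theorem pyDivOut_self (v : Int) (hv : 2 ≤ v) : pyDivOut v v = 1 := by
  have hg : 2 ≤ v ∧ 0 < v ∧ PySem.Int.mod v v = 0 :=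
    ⟨hv, by omega, (PySem.Int.mod_eq_zero_iff_dvd v v).mpr dvd_rfl⟩
  rw [pyDivOut_eq, if_pos hg]
  rw [PySem.Int.floordiv_eq_ediv_of_pos (by omega), Int.ediv_self (by omega)]
  rw [pyDivOut_eq, if_neg]
  rintro ⟨-, -, hm⟩
  have := (PySem.Int.mod_eq_zero_iff_dvd 1 v).mp hm
  have := Int.le_of_dvd one_pos this
  omega

theorem skWhile_self (i n v : Int) (moves : List Bool) (hv : 2 ≤ v) :
    skWhile i n v v moves =
      (if i + v < n then PySem.List.pySetD moves (i + v) true else moves) := by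
  have hg : 1 < v ∧ 2 ≤ v ∧ v ≤ v := ⟨by omega, hv, le_rfl⟩
  rw [skWhile_eq, if_pos hg,
    if_pos ((PySem.Int.mod_eq_zero_iff_dvd v v).mpr dvd_rfl), pyDivOut_self v hv]
  rw [skWhile_eq, if_neg]
  rintro ⟨h1, -, -⟩
  omega

-- If v has no divisor in [2, v), A's loop from any d ∈ [2, v] just counts d up to v and marks i + v.
theorem skWhile_prime : ∀ (M : Nat) (i n v d : Int) (moves : List Bool),
    (v - d).toNat ≤ M → 2 ≤ d → d ≤ v →
    (∀ e : Int, 2 ≤ e → e < v → ¬ e ∣ v) →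
    skWhile i n v d moves =
      (if i + v < n then PySem.List.pySetD moves (i + v) true else moves) := by
  intro M
  induction M with
  | zero =>
    intro i n v d moves hM hd hdv hpr
    have : d = v := by omega
    subst this
    exact skWhile_self i n d moves hd
  | succ M ih =>
    intro i n v d moves hM hd hdv hpr
    by_cases he : d = v
    · subst he; exact skWhile_self i n d moves hd
    · have hdlt : d < v := by omega
      have hg : 1 < v ∧ 2 ≤ d ∧ d ≤ v := ⟨by omega, hd, hdv⟩
      rw [skWhile_eq, if_pos hg,
        if_neg (fun hm => hpr d hd hdlt ((PySem.Int.mod_eq_zero_iff_dvd v d).mp hm))]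
      exact ih i n v (d + 1) moves (by omega) (by omega) (by omega) hpr

-- Main inner-loop bridge: from a state where all divisors < d have been excluded, A's full trial
-- division produces exactly the marks of B's sqrt-bounded factor list.
theorem skWhile_eq_altFactors : ∀ (M : Nat) (i n v d : Int) (moves : List Bool),
    3 * v.toNat + (v - d).toNat ≤ M → 2 ≤ d → (1 < v → d ≤ v) →
    (∀ e : Int, 2 ≤ e → e < d → ¬ e ∣ v) →
    skWhile i n v d moves =
      (altFactors v d).foldl
        (fun m p => if i + p < n then PySem.List.pySetD m (i + p) true else m) moves := by
  intro M
  induction M with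
  | zero =>
    intro i n v d moves hM hd hinv hpr
    have hv : ¬ 1 < v := by omega
    rw [skWhile_eq, if_neg (by rintro ⟨h1, -, -⟩; omega)]
    rw [altFactors_eq, if_neg (by rintro ⟨-, h2⟩; nlinarith), if_neg hv]
    simp
  | succ M ih =>
    intro i n v d moves hM hd hinv hpr
    by_cases hv : 1 < v
    case neg =>
      rw [skWhile_eq, if_neg (by rintro ⟨h1, -, -⟩; omega)]
      rw [altFactors_eq, if_neg (by rintro ⟨-, h2⟩; nlinarith), if_neg hv]
      simp
    case pos =>
    have hdv : d ≤ v := hinv hv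
    by_cases hm : PySem.Int.mod v d = 0
    · have hdvd : d ∣ v := (PySem.Int.mod_eq_zero_iff_dvd v d).mp hm
      obtain ⟨p1, p2, p3, p4⟩ := pyDivOut_spec v.toNat v d le_rfl hd (by omega)
      by_cases hsq : d * d ≤ v
      · -- both recurse with the divided value
        have hgA : 1 < v ∧ 2 ≤ d ∧ d ≤ v := ⟨hv, hd, hdv⟩
        have hgB : 2 ≤ d ∧ d * d ≤ v := ⟨hd, hsq⟩
        rw [skWhile_eq, if_pos hgA, if_pos hm]
        rw [altFactors_eq, if_pos hgB, if_pos hm]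
        rw [List.foldl_cons]
        have hmu := muDec_div v d hv hd hm
        refine ih i n (pyDivOut v d) (d + 1) _ (by omega) (by omega) ?_ ?_
        · intro hv'
          by_contra hle
          have hv'd : pyDivOut v d ≤ d := by omega
          rcases lt_or_eq_of_le hv'd with hlt | heq
          · exact hpr (pyDivOut v d) (by omega) hlt p3
          · rw [heq] at p4; exact p4 dvd_rfl
        · intro e he helt hedvd
          rcases lt_or_eq_of_le (by omega : e ≤ d) with hlt | heq
          · exact hpr e he hlt (hedvd.trans p3)
          · subst heq; exact p4 hedvd
      · -- d divides v but d*d > v: with no smaller divisor this forces v = d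
        have hmul : v / d * d = v := Int.ediv_mul_cancel hdvd
        have hq1 : 1 ≤ v / d := by nlinarith [Int.ediv_nonneg (by omega : (0:Int) ≤ v) (by omega : (0:Int) ≤ d)]
        have hqd : v / d < d := by nlinarith
        have hveq : v = d := by
          rcases lt_or_eq_of_le hq1 with hq2 | hq2
          · exact absurd ⟨d, hmul.symm⟩ (hpr (v / d) (by omega) (by omega))
          · nlinarith
        rw [altFactors_eq, if_neg (by rintro ⟨-, h2⟩; exact hsq h2), if_pos hv]
        rw [List.foldl_cons, List.foldl_nil]
        rw [← hveq]
        exact skWhile_self i n v moves (by omega)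
    · have hnd : ¬ d ∣ v := fun hdvd => hm ((PySem.Int.mod_eq_zero_iff_dvd v d).mpr hdvd)
      have hdlt : d < v := by
        rcases lt_or_eq_of_le hdv with h | h
        · exact h
        · exact absurd (h ▸ dvd_rfl) hnd
      by_cases hsq : d * d ≤ v
      · have hgA : 1 < v ∧ 2 ≤ d ∧ d ≤ v := ⟨hv, hd, hdv⟩
        have hgB : 2 ≤ d ∧ d * d ≤ v := ⟨hd, hsq⟩
        rw [skWhile_eq, if_pos hgA, if_neg hm]
        rw [altFactors_eq, if_pos hgB, if_neg hm]
        refine ih i n v (d + 1) moves (by omega) (by omega) (by omega) ?_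
        intro e he helt hedvd
        rcases lt_or_eq_of_le (by omega : e ≤ d) with hlt | heq
        · exact hpr e he hlt hedvd
        · exact hnd (heq ▸ hedvd)
      · -- no divisor ≤ d and d*d > v: v is prime, both sides mark i + v
        have hpr' : ∀ e : Int, 2 ≤ e → e < v → ¬ e ∣ v := by
          intro e he helt hedvd
          rcases lt_trichotomy e d with hlt | heq | hgt
          · exact hpr e he hlt hedvd
          · subst heq; exact hnd hedvd
          · have hmul : v / e * e = v := Int.ediv_mul_cancel hedvd
            have hq1 : 1 ≤ v / e := by nlinarith [Int.ediv_nonneg (by omega : (0:Int) ≤ v) (by omega : (0:Int) ≤ e)]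
            have hqd : v / e < d := by nlinarith
            rcases lt_or_eq_of_le hq1 with hq2 | hq2
            · exact hpr (v / e) (by omega) (by omega) ⟨e, hmul.symm⟩
            · nlinarith
        rw [altFactors_eq, if_neg (by rintro ⟨-, h2⟩; exact hsq h2), if_pos hv]
        rw [List.foldl_cons, List.foldl_nil]
        exact skWhile_prime (v - d).toNat i n v d moves le_rfl hd hdv hpr'

theorem skoczek_eq (T : List Int) : skoczek T = skoczek_alt T := by
  simp only [skoczek, skoczek_alt]
  rw [PySem.List.enumerate_eq_map_pyRange T 0, List.foldl_map]
  rw [show PySem.List.len T = (T.length : Int) from PySem.List.len_eq T]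
  congr 1
  funext m j
  by_cases hmj : PySem.List.pyGetD m j false = true
  · rw [if_pos hmj, if_pos hmj]
    exact skWhile_eq_altFactors
      (3 * (PySem.List.pyGetD T j 0).toNat + (PySem.List.pyGetD T j 0 - 2).toNat)
      j T.length (PySem.List.pyGetD T j 0) 2 m le_rfl (by omega) (by omega) (by omega)
  · rw [if_neg hmj, if_neg hmj]

-- ===== VERDICT (by name: the statement is the Claim_ definition above) =====
theorem skoczek_spec : Claim_equal_skoczek := by
  intro T _ _
  unfold Spec_skoczek
  exact skoczek_eq T
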